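-- pv_equiv track=rewrite | github.com/unimib-datAI/gl-forecasting-edge-performance | src/utils/metrics.py | _find_optimal_display
-- ===== SOURCE A (Python) =====
-- import math
--
-- def _find_optimal_display(n: int) -> tuple[int, int]:
--     # find best number of rows and columns depending on the number of subplots to display
--     options = []
--
--     max_rows = int(math.ceil(n / 2))
--
--     for rows in range(1, max_rows + 1):
--         columns = math.ceil(n / rows)
--         diff = abs(rows - columns)
--
--         options.append((rows, columns, diff))
--
--     best = min(options, key=lambda x: x[2])
--
--     return best[0], best[1]
-- ===== SOURCE B (Python) =====
-- import math
--
--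
-- def _find_optimal_display(n: int) -> tuple[int, int]:
--     # O(1): the best rows count lies next to isqrt(n) (or at max_rows for tiny n),
--     # so evaluate only those few candidates instead of scanning every row count.
--     max_rows = -(-n // 2)
--     s = math.isqrt(n)
--     candidates = [r for r in (s - 1, s, s + 1, max_rows) if 1 <= r <= max_rows]
--     best_rows = min(candidates, key=lambda r: (abs(r - -(-n // r)), r))
--     return best_rows, -(-n // best_rows)
-- ===== Notes on version B (the rewrite author's own statement) =====
-- stated objective: faster
-- what changed: A scans every row count from 1 to ceil(n/2), builds a list of (rows, cols, diff) options and takes the min; B evaluates only the few candidate row counts next to isqrt(n) (plus max_rows for tiny n), using that |rows - ceil(n/rows)| strictly decreases before ceil(sqrt(n)) and strictly increases after it.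
import Mathlib
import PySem

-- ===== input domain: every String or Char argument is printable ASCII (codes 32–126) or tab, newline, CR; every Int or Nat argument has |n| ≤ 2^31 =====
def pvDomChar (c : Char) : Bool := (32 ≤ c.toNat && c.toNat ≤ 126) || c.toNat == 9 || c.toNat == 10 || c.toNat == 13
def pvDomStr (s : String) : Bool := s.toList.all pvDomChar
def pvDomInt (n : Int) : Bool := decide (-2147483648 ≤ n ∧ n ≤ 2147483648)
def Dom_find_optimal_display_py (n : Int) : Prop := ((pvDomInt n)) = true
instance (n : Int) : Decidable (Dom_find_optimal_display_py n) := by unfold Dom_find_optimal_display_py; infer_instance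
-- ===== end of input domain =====

-- B replaces A's scan of every row count in [1, ceil(n/2)] by an O(1) check of the few
-- candidate row counts next to isqrt(n) (objective: faster, asymptotic O(n) → O(1)).

-- ===== PORT A =====
-- math.ceil(n / r): on the domain (|n| ≤ 2^31 < 2^53) the float quotient rounds to the exact
-- ceiling, so it is ported as exact ceiling division -((-n) // r).
def pvCeilDiv (n r : Int) : Int := -(PySem.Int.floordiv (-n) r)

def find_optimal_display_py (n : Int) : List Int :=
  let max_rows := pvCeilDiv n 2
  let options := (PySem.List.pyRange 1 (max_rows + 1) 1).foldl
    (fun acc rows =>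
      let columns := pvCeilDiv n rows
      let diff := |rows - columns|
      acc ++ [(rows, columns, diff)]) ([] : List (Int × Int × Int))
  match PySem.List.min? options (fun x => x.2.2) with
  | some best => [best.1, best.2.1]
  | none => []   -- Python: min([]) raises ValueError; excluded by Pre_

-- ===== PORT B =====
def find_optimal_display_py_alt (n : Int) : List Int :=
  let max_rows := -(PySem.Int.floordiv (-n) 2)
  let s : Int := (Nat.sqrt n.toNat : Int)   -- math.isqrt(n); Python raises on n < 0, excluded by Pre_
  let candidates := ([s - 1, s, s + 1, max_rows]).filter (fun r => decide (1 ≤ r ∧ r ≤ max_rows))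
  match PySem.List.min2? candidates (fun r => |r - -(PySem.Int.floordiv (-n) r)|) (fun r => r) with
  | some r => [r, -(PySem.Int.floordiv (-n) r)]
  | none => []   -- Python: min([]) raises ValueError; excluded by Pre_

-- ===== PRECONDITION & SPEC =====
-- Pre_ excludes exactly n ≤ 0, where A's options list is empty and min([]) raises ValueError.
def Pre_find_optimal_display_py (n : Int) : Prop := 1 ≤ n
instance (n : Int) : Decidable (Pre_find_optimal_display_py n) := by unfold Pre_find_optimal_display_py; infer_instance
def pvWitness_find_optimal_display_py : Int := 7

def Spec_find_optimal_display_py (n : Int) (out : List Int) : Prop := out = find_optimal_display_py_alt n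
instance (n : Int) (out : List Int) : Decidable (Spec_find_optimal_display_py n out) := by unfold Spec_find_optimal_display_py; infer_instance

-- ===== CLAIM (what is proved, stated in full; the proofs are below) =====
def Claim_equal_find_optimal_display_py : Prop := ∀ (n : Int), Dom_find_optimal_display_py n → Pre_find_optimal_display_py n → Spec_find_optimal_display_py n (find_optimal_display_py n)

-- ===== LEMMAS AND PROOFS =====

-- ---- generic lemmas about the left folds performed by Python's min with a key ----

theorem pv_fold_keep {α β : Type} (step : Option α → β → Option α) :
    ∀ (l : List β) (m : α), (∀ x ∈ l, step (some m) x = some m) →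
      l.foldl step (some m) = some m := by
  intro l
  induction l with
  | nil => intro m _; rfl
  | cons x t ih =>
    intro m h
    rw [List.foldl_cons, h x (by simp)]
    exact ih m (fun r hr => h r (by simp [hr]))

theorem pv_fold_stays_some {α : Type} (step : Option α → α → Option α)
    (hs : ∀ m x, step (some m) x = some x ∨ step (some m) x = some m) :
    ∀ (l : List α) (m : α), ∃ m', l.foldl step (some m) = some m' ∧ (m' = m ∨ m' ∈ l) := by
  intro l
  induction l with
  | nil => intro m; exact ⟨m, rfl, Or.inl rfl⟩
  | cons x t ih =>
    intro m
    rcases hs m x with h | h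
    · obtain ⟨m', hm', hmem⟩ := ih x
      refine ⟨m', by rw [List.foldl_cons, h]; exact hm', Or.inr ?_⟩
      rcases hmem with rfl | hm
      · exact List.mem_cons_self
      · exact List.mem_cons_of_mem _ hm
    · obtain ⟨m', hm', hmem⟩ := ih m
      refine ⟨m', by rw [List.foldl_cons, h]; exact hm', ?_⟩
      rcases hmem with rfl | hm
      · exact Or.inl rfl
      · exact Or.inr (List.mem_cons_of_mem _ hm)

theorem pv_fold_none_cases {α : Type} (step : Option α → α → Option α)
    (hstart : ∀ x, step none x = some x)
    (hs : ∀ m x, step (some m) x = some x ∨ step (some m) x = some m) :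
    ∀ (l : List α), (l = [] ∧ l.foldl step none = none) ∨
      ∃ m, m ∈ l ∧ l.foldl step none = some m := by
  intro l
  cases l with
  | nil => exact Or.inl ⟨rfl, rfl⟩
  | cons x t =>
    right
    obtain ⟨m', hm', hmem⟩ := pv_fold_stays_some step hs t x
    refine ⟨m', ?_, by rw [List.foldl_cons, hstart]; exact hm'⟩
    rcases hmem with rfl | hm
    · exact List.mem_cons_self
    · exact List.mem_cons_of_mem _ hm

-- min with a key returns the FIRST element with minimal key: if r0 strictly beats
-- everything before it and weakly beats everything after it, the fold returns r0.
theorem pv_fold_first_argmin {α : Type} (step : Option α → α → Option α)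
    (hstart : ∀ x, step none x = some x)
    (hs : ∀ m x, step (some m) x = some x ∨ step (some m) x = some m)
    (l1 l2 : List α) (r0 : α)
    (hsel : ∀ m ∈ l1, step (some m) r0 = some r0)
    (hkeep : ∀ x ∈ l2, step (some r0) x = some r0) :
    (l1 ++ r0 :: l2).foldl step none = some r0 := by
  rw [List.foldl_append]
  rcases pv_fold_none_cases step hstart hs l1 with ⟨rfl, hnone⟩ | ⟨m, hm, hsome⟩
  · rw [hnone, List.foldl_cons, hstart]
    exact pv_fold_keep step l2 r0 hkeep
  · rw [hsome, List.foldl_cons, hsel m hm]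
    exact pv_fold_keep step l2 r0 hkeep

-- invariant of the fold of min with a tuple key: the accumulator is lex-minimal so far
theorem pv_fold_first_min {α : Type} (step : Option α → α → Option α) (le : α → α → Prop)
    (htrans : ∀ a b c, le a b → le b c → le a c)
    (hstep : ∀ m x, (step (some m) x = some x ∧ le x m) ∨ (step (some m) x = some m ∧ le m x)) :
    ∀ (l : List α) (m m' : α), l.foldl step (some m) = some m' →
      le m' m ∧ ∀ y ∈ l, le m' y := by
  intro l
  induction l with
  | nil =>
    intro m m' h
    rw [List.foldl_nil] at h
    injection h with h
    subst h
    refine ⟨?_, by simp⟩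
    rcases hstep m m with ⟨_, h2⟩ | ⟨_, h2⟩
    · exact h2
    · exact h2
  | cons x t ih =>
    intro m m' h
    rw [List.foldl_cons] at h
    rcases hstep m x with ⟨heq, hle⟩ | ⟨heq, hle⟩
    · rw [heq] at h
      obtain ⟨h1, h2⟩ := ih x m' h
      refine ⟨htrans _ _ _ h1 hle, ?_⟩
      intro y hy
      rcases List.mem_cons.mp hy with rfl | hy'
      · exact h1
      · exact h2 y hy'
    · rw [heq] at h
      obtain ⟨h1, h2⟩ := ih m m' h
      refine ⟨h1, ?_⟩
      intro y hy
      rcases List.mem_cons.mp hy with rfl | hy'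
      · exact htrans _ _ _ h1 hle
      · exact h2 y hy'

-- if r0 is in l and lex-minimal over l, min with that (injective) lex key returns r0
theorem pv_fold_min_eq {α : Type} (step : Option α → α → Option α) (le : α → α → Prop)
    (htrans : ∀ a b c, le a b → le b c → le a c)
    (hantisym : ∀ a b, le a b → le b a → a = b)
    (hstart : ∀ x, step none x = some x)
    (hstep : ∀ m x, (step (some m) x = some x ∧ le x m) ∨ (step (some m) x = some m ∧ le m x))
    (l : List α) (r0 : α) (h0 : r0 ∈ l) (h : ∀ r ∈ l, le r0 r) :
    l.foldl step none = some r0 := by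
  have hs : ∀ m x, step (some m) x = some x ∨ step (some m) x = some m := by
    intro m x
    rcases hstep m x with ⟨h1, -⟩ | ⟨h1, -⟩
    · exact Or.inl h1
    · exact Or.inr h1
  rcases pv_fold_none_cases step hstart hs l with ⟨rfl, -⟩ | ⟨m, hm, hsome⟩
  · simp at h0
  · rw [hsome]
    cases l with
    | nil => simp at h0
    | cons x t =>
      rw [List.foldl_cons, hstart] at hsome
      obtain ⟨h1, h2⟩ := pv_fold_first_min step le htrans hstep t x m hsome
      have hmr0 : le m r0 := by
        rcases List.mem_cons.mp h0 with rfl | h0'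
        · exact h1
        · exact h2 r0 h0'
      rw [hantisym m r0 hmr0 (h m hm)]

-- folding a mapped list commutes with mapping the accumulator
theorem pv_foldl_map_comm {α β : Type} (f : α → β)
    (step1 : Option β → β → Option β) (step2 : Option α → α → Option α)
    (hcomm : ∀ (acc : Option α) (x : α), step1 (acc.map f) (f x) = (step2 acc x).map f)
    (l : List α) :
    (l.map f).foldl step1 none = (l.foldl step2 none).map f := by
  suffices haux : ∀ (l : List α) (acc : Option α),
      (l.map f).foldl step1 (acc.map f) = (l.foldl step2 acc).map f by
    have := haux l none
    simpa using this
  intro l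
  induction l with
  | nil => intro acc; simp
  | cons x t ih =>
    intro acc
    simp only [List.map_cons, List.foldl_cons]
    rw [hcomm acc x]
    exact ih (step2 acc x)

theorem pv_foldl_append_map {α β : Type} (f : α → β) :
    ∀ (l : List α) (acc : List β),
      l.foldl (fun acc x => acc ++ [f x]) acc = acc ++ l.map f := by
  intro l
  induction l with
  | nil => intro acc; simp
  | cons x t ih => intro acc; simp [ih]

-- lexicographic order on the tuple key (d r, r) used by B's min
def pvLexLe (d : Int → Int) (a b : Int) : Prop := d a < d b ∨ (d a = d b ∧ a ≤ b)

-- ---- arithmetic: ceiling division, isqrt, unimodality of r ↦ |r - ceil(n/r)| ----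

theorem pv_cd_bounds (n r : Int) (hr : 0 < r) :
    (pvCeilDiv n r - 1) * r < n ∧ n ≤ pvCeilDiv n r * r := by
  have := (PySem.Int.neg_floordiv_neg_eq_iff_of_pos (a := n) (b := r) (q := pvCeilDiv n r) hr).mp rfl
  exact this

theorem pv_cd_pos (n r : Int) (hn : 1 ≤ n) (hr : 0 < r) : 1 ≤ pvCeilDiv n r := by
  obtain ⟨_, h2⟩ := pv_cd_bounds n r hr
  nlinarith

theorem pv_cd_antitone (n r r' : Int) (hn : 1 ≤ n) (hr : 1 ≤ r) (hrr : r ≤ r') :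
    pvCeilDiv n r' ≤ pvCeilDiv n r := by
  obtain ⟨h1, h2⟩ := pv_cd_bounds n r (by omega)
  obtain ⟨h1', h2'⟩ := pv_cd_bounds n r' (by omega)
  have hq : 1 ≤ pvCeilDiv n r := pv_cd_pos n r hn (by omega)
  by_contra hcon
  push Not at hcon
  have : pvCeilDiv n r ≤ pvCeilDiv n r' - 1 := by omega
  nlinarith

theorem pv_cd_le_self_iff (n r : Int) (hn : 1 ≤ n) (hr : 1 ≤ r) :
    pvCeilDiv n r ≤ r ↔ n ≤ r * r := by
  obtain ⟨h1, h2⟩ := pv_cd_bounds n r (by omega)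
  constructor
  · intro h; nlinarith
  · intro h
    by_contra hcon
    push Not at hcon
    nlinarith

theorem pv_d_left (n r : Int) (hn : 1 ≤ n) (hr : 1 ≤ r) (h : r * r < n) :
    |r - pvCeilDiv n r| = pvCeilDiv n r - r := by
  have : ¬ pvCeilDiv n r ≤ r := by
    rw [pv_cd_le_self_iff n r hn hr]; omega
  rw [abs_of_nonpos (by omega)]; omega

theorem pv_d_right (n r : Int) (hn : 1 ≤ n) (hr : 1 ≤ r) (h : n ≤ r * r) :
    |r - pvCeilDiv n r| = r - pvCeilDiv n r := by
  have := (pv_cd_le_self_iff n r hn hr).mpr h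
  rw [abs_of_nonneg (by omega)]

theorem pv_L_left (n r r' : Int) (hn : 1 ≤ n) (hr : 1 ≤ r) (hrr : r < r') (h : r' * r' < n) :
    |r' - pvCeilDiv n r'| < |r - pvCeilDiv n r| := by
  have hrsq : r * r < n := by nlinarith
  rw [pv_d_left n r hn hr hrsq, pv_d_left n r' hn (by omega) h]
  have := pv_cd_antitone n r r' hn hr (by omega)
  omega

theorem pv_L_right (n r r' : Int) (hn : 1 ≤ n) (hr : 1 ≤ r) (h : n ≤ r * r) (hrr : r < r') :
    |r - pvCeilDiv n r| < |r' - pvCeilDiv n r'| := by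
  have h' : n ≤ r' * r' := by nlinarith
  rw [pv_d_right n r hn hr h, pv_d_right n r' hn (by omega) h']
  have := pv_cd_antitone n r r' hn hr (by omega)
  omega

-- r* = ceil(sqrt n), the least r ≥ 1 with n ≤ r²
def pvRstar (n : Int) : Int :=
  let s : Int := (Nat.sqrt n.toNat : Int)
  if n ≤ s * s then s else s + 1

theorem pv_rstar_spec (n : Int) (hn : 1 ≤ n) :
    1 ≤ pvRstar n ∧ n ≤ pvRstar n * pvRstar n ∧ (pvRstar n - 1) * (pvRstar n - 1) < n := by
  unfold pvRstar
  set s : Int := (Nat.sqrt n.toNat : Int) with hs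
  have h1 : s * s ≤ n := by
    have hpow : Nat.sqrt n.toNat * Nat.sqrt n.toNat ≤ n.toNat := by
      simpa [pow_two] using Nat.sqrt_le' n.toNat
    have hcast : ((Nat.sqrt n.toNat * Nat.sqrt n.toNat : Nat) : Int) ≤ ((n.toNat : Nat) : Int) := by
      exact_mod_cast hpow
    push_cast at hcast
    rw [Int.toNat_of_nonneg (by omega)] at hcast
    exact_mod_cast hcast
  have h2 : n < (s + 1) * (s + 1) := by
    have hpow : n.toNat < (Nat.sqrt n.toNat + 1) * (Nat.sqrt n.toNat + 1) := by
      simpa [pow_two, Nat.succ_eq_add_one] using Nat.lt_succ_sqrt' n.toNat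
    have hcast : ((n.toNat : Nat) : Int) < (((Nat.sqrt n.toNat + 1) * (Nat.sqrt n.toNat + 1) : Nat) : Int) := by
      exact_mod_cast hpow
    push_cast at hcast
    rw [Int.toNat_of_nonneg (by omega)] at hcast
    exact_mod_cast hcast
  have hs0 : 0 ≤ s := by positivity
  by_cases h : n ≤ s * s
  · rw [if_pos h]
    have hs1 : 1 ≤ s := by nlinarith
    refine ⟨hs1, h, ?_⟩; nlinarith
  · rw [if_neg h]
    push Not at h
    exact ⟨by omega, by nlinarith, by simpa using h⟩

theorem pv_lt_rstar_sq (n r : Int) (hn : 1 ≤ n) (hr : 1 ≤ r) (h : r < pvRstar n) :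
    r * r < n := by
  obtain ⟨_, _, h3⟩ := pv_rstar_spec n hn
  nlinarith

-- the row count A's first-minimum selects
def pvR0 (n : Int) : Int :=
  let rs := pvRstar n
  let M := pvCeilDiv n 2
  if rs ≤ M then
    (if 2 ≤ rs ∧ |rs - 1 - pvCeilDiv n (rs - 1)| ≤ |rs - pvCeilDiv n rs| then rs - 1 else rs)
  else M

-- pvR0 is in range, is a strict minimum to its left, and a weak minimum to its right
theorem pv_r0_spec (n : Int) (hn : 1 ≤ n) :
    (1 ≤ pvR0 n ∧ pvR0 n ≤ pvCeilDiv n 2) ∧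
    (∀ r, 1 ≤ r → r < pvR0 n → |pvR0 n - pvCeilDiv n (pvR0 n)| < |r - pvCeilDiv n r|) ∧
    (∀ r, pvR0 n < r → r ≤ pvCeilDiv n 2 → |pvR0 n - pvCeilDiv n (pvR0 n)| ≤ |r - pvCeilDiv n r|) := by
  obtain ⟨hrs1, hrs2, hrs3⟩ := pv_rstar_spec n hn
  have hM : 1 ≤ pvCeilDiv n 2 := pv_cd_pos n 2 hn (by omega)
  unfold pvR0
  set rs := pvRstar n
  set M := pvCeilDiv n 2 with hMdef
  by_cases hcase : rs ≤ M
  · rw [if_pos hcase]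
    by_cases hc2 : 2 ≤ rs ∧ |rs - 1 - pvCeilDiv n (rs - 1)| ≤ |rs - pvCeilDiv n rs|
    · rw [if_pos hc2]
      obtain ⟨hge2, hdle⟩ := hc2
      refine ⟨⟨by omega, by omega⟩, ?_, ?_⟩
      · intro r hr hlt
        exact pv_L_left n r (rs - 1) hn hr hlt (pv_lt_rstar_sq n (rs - 1) hn (by omega) (by omega))
      · intro r hlt _
        rcases eq_or_lt_of_le (by omega : rs ≤ r) with rfl | hgt
        · exact hdle
        · exact le_of_lt (lt_of_le_of_lt hdle (pv_L_right n rs r hn hrs1 hrs2 hgt))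
    · rw [if_neg hc2]
      refine ⟨⟨by omega, hcase⟩, ?_, ?_⟩
      · intro r hr hlt
        have hge2 : 2 ≤ rs := by omega
        have hstar : |rs - pvCeilDiv n rs| < |rs - 1 - pvCeilDiv n (rs - 1)| := by
          rcases not_and_or.mp hc2 with h | h
          · omega
          · push Not at h; exact h
        rcases eq_or_lt_of_le (by omega : r ≤ rs - 1) with rfl | hlt'
        · exact hstar
        · exact lt_trans hstar
            (pv_L_left n r (rs - 1) hn hr hlt' (pv_lt_rstar_sq n (rs - 1) hn (by omega) (by omega)))
      · intro r hlt _
        exact le_of_lt (pv_L_right n rs r hn hrs1 hrs2 hlt)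
  · rw [if_neg hcase]
    push Not at hcase
    refine ⟨⟨hM, le_refl _⟩, ?_, ?_⟩
    · intro r hr hlt
      exact pv_L_left n r M hn hr hlt (pv_lt_rstar_sq n M hn hM hcase)
    · intro r hlt hle; omega

-- pvR0 is among B's candidates
theorem pv_r0_mem (n : Int) (hn : 1 ≤ n) :
    pvR0 n ∈ [((Nat.sqrt n.toNat : Nat) : Int) - 1, ((Nat.sqrt n.toNat : Nat) : Int),
              ((Nat.sqrt n.toNat : Nat) : Int) + 1, pvCeilDiv n 2] := by
  unfold pvR0
  have hstar : pvRstar n = ((Nat.sqrt n.toNat : Nat) : Int) ∨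
      pvRstar n = ((Nat.sqrt n.toNat : Nat) : Int) + 1 := by
    unfold pvRstar
    by_cases h : n ≤ ((Nat.sqrt n.toNat : Nat) : Int) * ((Nat.sqrt n.toNat : Nat) : Int)
    · left; simp [h]
    · right; simp [h]
  by_cases hcase : pvRstar n ≤ pvCeilDiv n 2
  · rw [if_pos hcase]
    by_cases hc2 : 2 ≤ pvRstar n ∧
        |pvRstar n - 1 - pvCeilDiv n (pvRstar n - 1)| ≤ |pvRstar n - pvCeilDiv n (pvRstar n)|
    · rw [if_pos hc2]; rcases hstar with h | h <;> simp [h]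
    · rw [if_neg hc2]; rcases hstar with h | h <;> simp [h]
  · rw [if_neg hcase]; simp

-- ===== main proof =====

theorem pv_A_eval (n : Int) (hn : 1 ≤ n) :
    find_optimal_display_py n = [pvR0 n, pvCeilDiv n (pvR0 n)] := by
  obtain ⟨⟨hr1, hr2⟩, hleft, hright⟩ := pv_r0_spec n hn
  unfold find_optimal_display_py
  show (match PySem.List.min?
      (List.foldl (fun acc rows => acc ++ [(rows, pvCeilDiv n rows, |rows - pvCeilDiv n rows|)])
        [] (PySem.List.pyRange 1 (pvCeilDiv n 2 + 1) 1))
      (fun x => x.2.2) with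
    | some best => [best.1, best.2.1]
    | none => ([] : List Int)) = [pvR0 n, pvCeilDiv n (pvR0 n)]
  rw [pv_foldl_append_map (fun rows => (rows, pvCeilDiv n rows, |rows - pvCeilDiv n rows|))
      (PySem.List.pyRange 1 (pvCeilDiv n 2 + 1) 1) []]
  simp only [List.nil_append]
  have hmin : PySem.List.min?
      ((PySem.List.pyRange 1 (pvCeilDiv n 2 + 1) 1).map
        (fun rows => (rows, pvCeilDiv n rows, |rows - pvCeilDiv n rows|)))
      (fun x => x.2.2)
      = (PySem.List.min? (PySem.List.pyRange 1 (pvCeilDiv n 2 + 1) 1)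
          (fun r => |r - pvCeilDiv n r|)).map
        (fun rows => (rows, pvCeilDiv n rows, |rows - pvCeilDiv n rows|)) := by
    unfold PySem.List.min?
    refine pv_foldl_map_comm _ _ _ ?_ _
    intro acc x
    cases acc with
    | none => rfl
    | some m =>
      show (if |x - pvCeilDiv n x| < |m - pvCeilDiv n m| then _ else _) =
        Option.map _ (if |x - pvCeilDiv n x| < |m - pvCeilDiv n m| then some x else some m)
      split_ifs <;> rfl
  rw [hmin]
  have hsplit : PySem.List.pyRange 1 (pvCeilDiv n 2 + 1) 1 =
      PySem.List.pyRange 1 (pvR0 n) 1 ++ pvR0 n :: PySem.List.pyRange (pvR0 n + 1) (pvCeilDiv n 2 + 1) 1 := by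
    rw [PySem.List.pyRange_one_append 1 (pvR0 n) (pvCeilDiv n 2 + 1) (by omega) (by omega)]
    rw [PySem.List.pyRange_one_cons (a := pvR0 n) (b := pvCeilDiv n 2 + 1) (by omega)]
  have hfirst : PySem.List.min? (PySem.List.pyRange 1 (pvCeilDiv n 2 + 1) 1)
      (fun r => |r - pvCeilDiv n r|) = some (pvR0 n) := by
    unfold PySem.List.min?
    rw [hsplit]
    refine pv_fold_first_argmin _ (fun x => rfl) ?_ _ _ _ ?_ ?_
    · intro m x
      show (if |x - pvCeilDiv n x| < |m - pvCeilDiv n m| then some x else some m) = some x ∨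
        (if |x - pvCeilDiv n x| < |m - pvCeilDiv n m| then some x else some m) = some m
      split_ifs <;> simp
    · intro m hm
      rw [PySem.List.mem_pyRange_one] at hm
      show (if |pvR0 n - pvCeilDiv n (pvR0 n)| < |m - pvCeilDiv n m| then some (pvR0 n) else some m)
        = some (pvR0 n)
      rw [if_pos (hleft m hm.1 hm.2)]
    · intro x hx
      rw [PySem.List.mem_pyRange_one] at hx
      show (if |x - pvCeilDiv n x| < |pvR0 n - pvCeilDiv n (pvR0 n)| then some x else some (pvR0 n))
        = some (pvR0 n)
      rw [if_neg (not_lt.mpr (hright x (by omega) (by omega)))]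
  rw [hfirst]
  rfl

theorem pv_B_eval (n : Int) (hn : 1 ≤ n) :
    find_optimal_display_py_alt n = [pvR0 n, pvCeilDiv n (pvR0 n)] := by
  obtain ⟨⟨hr1, hr2⟩, hleft, hright⟩ := pv_r0_spec n hn
  unfold find_optimal_display_py_alt
  show (match PySem.List.min2?
      (([((Nat.sqrt n.toNat : Nat) : Int) - 1, ((Nat.sqrt n.toNat : Nat) : Int),
        ((Nat.sqrt n.toNat : Nat) : Int) + 1, -(PySem.Int.floordiv (-n) 2)]).filter
        (fun r => decide (1 ≤ r ∧ r ≤ -(PySem.Int.floordiv (-n) 2))))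
      (fun r => |r - -(PySem.Int.floordiv (-n) r)|) (fun r => r) with
    | some r => [r, -(PySem.Int.floordiv (-n) r)]
    | none => ([] : List Int)) = [pvR0 n, pvCeilDiv n (pvR0 n)]
  have hmemcand : pvR0 n ∈ ([((Nat.sqrt n.toNat : Nat) : Int) - 1, ((Nat.sqrt n.toNat : Nat) : Int),
      ((Nat.sqrt n.toNat : Nat) : Int) + 1, -(PySem.Int.floordiv (-n) 2)]).filter
      (fun r => decide (1 ≤ r ∧ r ≤ -(PySem.Int.floordiv (-n) 2))) := by
    rw [List.mem_filter]
    refine ⟨?_, ?_⟩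
    · have := pv_r0_mem n hn
      simpa [pvCeilDiv] using this
    · simp only [decide_eq_true_eq]
      exact ⟨hr1, hr2⟩
  have hkey : PySem.List.min2?
      (([((Nat.sqrt n.toNat : Nat) : Int) - 1, ((Nat.sqrt n.toNat : Nat) : Int),
        ((Nat.sqrt n.toNat : Nat) : Int) + 1, -(PySem.Int.floordiv (-n) 2)]).filter
        (fun r => decide (1 ≤ r ∧ r ≤ -(PySem.Int.floordiv (-n) 2))))
      (fun r => |r - -(PySem.Int.floordiv (-n) r)|) (fun r => r) = some (pvR0 n) := by
    unfold PySem.List.min2?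
    refine pv_fold_min_eq _ (pvLexLe (fun r => |r - pvCeilDiv n r|)) ?_ ?_ (fun x => rfl) ?_ _
      (pvR0 n) hmemcand ?_
    · intro a b c hab hbc
      unfold pvLexLe at *
      rcases hab with h1 | ⟨h1, h2⟩ <;> rcases hbc with g1 | ⟨g1, g2⟩ <;>
        first
        | exact Or.inl (by omega)
        | exact Or.inr ⟨by omega, by omega⟩
    · intro a b hab hba
      unfold pvLexLe at *
      omega
    · intro m x
      show ((if (decide (|x - pvCeilDiv n x| < |m - pvCeilDiv n m|) ||
              !decide (|m - pvCeilDiv n m| < |x - pvCeilDiv n x|) && decide (x < m)) = true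
            then some x else some m) = some x ∧ pvLexLe (fun r => |r - pvCeilDiv n r|) x m) ∨
        ((if (decide (|x - pvCeilDiv n x| < |m - pvCeilDiv n m|) ||
              !decide (|m - pvCeilDiv n m| < |x - pvCeilDiv n x|) && decide (x < m)) = true
            then some x else some m) = some m ∧ pvLexLe (fun r => |r - pvCeilDiv n r|) m x)
      by_cases hc : (decide (|x - pvCeilDiv n x| < |m - pvCeilDiv n m|) ||
          !decide (|m - pvCeilDiv n m| < |x - pvCeilDiv n x|) && decide (x < m)) = true
      · left
        refine ⟨by rw [if_pos hc], ?_⟩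
        simp only [Bool.or_eq_true, Bool.and_eq_true, Bool.not_eq_true', decide_eq_true_eq,
          decide_eq_false_iff_not] at hc
        unfold pvLexLe
        dsimp only
        omega
      · right
        refine ⟨by rw [if_neg hc], ?_⟩
        simp only [Bool.or_eq_true, Bool.and_eq_true, Bool.not_eq_true', decide_eq_true_eq,
          decide_eq_false_iff_not] at hc
        unfold pvLexLe
        dsimp only
        push Not at hc
        omega
    · intro r hr
      rw [List.mem_filter] at hr
      obtain ⟨-, hpred⟩ := hr
      simp only [decide_eq_true_eq] at hpred
      obtain ⟨hrge, hrle⟩ := hpred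
      have hrle' : r ≤ pvCeilDiv n 2 := hrle
      unfold pvLexLe
      rcases lt_trichotomy r (pvR0 n) with h | h | h
      · exact Or.inl (hleft r hrge h)
      · exact Or.inr ⟨by rw [h], by omega⟩
      · rcases eq_or_lt_of_le (hright r h hrle') with heq | hlt
        · exact Or.inr ⟨heq, by omega⟩
        · exact Or.inl hlt
  rw [hkey]
  rfl

-- ===== VERDICT (by name: the statement is the Claim_ definition above) =====
theorem find_optimal_display_py_spec : Claim_equal_find_optimal_display_py := by
  intro n _ hpre
  unfold Spec_find_optimal_display_py
  rw [pv_A_eval n hpre, pv_B_eval n hpre]
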